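-- pv_equiv track=rewrite | github.com/Stanford-ILIAD/teaching | compile/lib/omniglot/digits_utils.py | create_v_sequence_dict
-- ===== SOURCE A (Python) =====
-- def create_v_sequence_dict(skill_len):
--     states_x=[0]
--     states_y=[0]
--     actions_x = []
--     actions_y = []
--     for i in range(int(skill_len/2)):
--         actions_x.append(1)
--         actions_y.append(-2)
--         states_x.append(states_x[-1]+(actions_x[-1]))
--         states_y.append(states_y[-1]+(actions_y[-1]))
--     for i in range(int(skill_len/2), skill_len):
--         actions_x.append(1)
--         actions_y.append(2)
--         states_x.append(states_x[-1]+(actions_x[-1]))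
--         states_y.append(states_y[-1]+(actions_y[-1]))
--     char_dict = {"states":[(states_x[i], states_y[i]) for i in range(len(states_x))],
-- "actions": [(actions_x[i], actions_y[i]) for i in range(len(actions_x))]}
--     return char_dict
-- ===== SOURCE B (Python) =====
-- def create_v_sequence_dict(skill_len):
--     half = int(skill_len / 2)
--     actions = [(1, -2) if i < half else (1, 2) for i in range(skill_len)]
--     states = [(0, 0)] + [(i, -2 * i if i <= half else 2 * i - 4 * half)
--                          for i in range(1, skill_len + 1)]
--     return {"states": states, "actions": actions}
-- ===== Notes on version B (the rewrite author's own statement) =====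
-- stated objective: simpler
-- what changed: Replaces A's two loops of running accumulators (four lists grown by appending to the previous last element) by closed-form per-index formulas: each action and state is computed directly from its index in a comprehension.
import Mathlib
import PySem

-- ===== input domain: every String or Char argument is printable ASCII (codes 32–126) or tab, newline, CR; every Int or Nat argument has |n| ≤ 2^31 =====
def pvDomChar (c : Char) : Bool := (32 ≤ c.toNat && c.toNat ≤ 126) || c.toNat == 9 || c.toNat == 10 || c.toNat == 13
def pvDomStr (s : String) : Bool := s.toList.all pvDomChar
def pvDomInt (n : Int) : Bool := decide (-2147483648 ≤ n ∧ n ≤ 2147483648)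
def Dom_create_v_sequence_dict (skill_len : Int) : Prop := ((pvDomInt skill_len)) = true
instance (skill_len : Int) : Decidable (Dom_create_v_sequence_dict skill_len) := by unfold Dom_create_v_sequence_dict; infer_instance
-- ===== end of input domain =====

-- B replaces A's running accumulators by closed-form per-index formulas (objective: simpler).

-- ===== PORT A =====
-- one iteration of A's loop body; dy is the constant appended to actions_y (-2 or 2)
def pvStepA (dy : Int) (st : List Int × List Int × List Int × List Int) (_i : Int) :
    List Int × List Int × List Int × List Int :=
  match st with
  | (sx, sy, ax, ay) =>
    let ax := ax ++ [1]
    let ay := ay ++ [dy]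
    let sx := sx ++ [PySem.List.pyGetD sx (-1) 0 + PySem.List.pyGetD ax (-1) 0]
    let sy := sy ++ [PySem.List.pyGetD sy (-1) 0 + PySem.List.pyGetD ay (-1) 0]
    (sx, sy, ax, ay)

def create_v_sequence_dict (skill_len : Int) : List (String × List (Int × Int)) :=
  -- int(skill_len/2): exact float division then truncation toward zero = Int.tdiv on |skill_len| ≤ 2^31
  let st1 := (PySem.List.pyRange 0 (skill_len.tdiv 2) 1).foldl (pvStepA (-2)) ([0], [0], [], [])
  let st2 := (PySem.List.pyRange (skill_len.tdiv 2) skill_len 1).foldl (pvStepA 2) st1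
  match st2 with
  | (sx, sy, ax, ay) =>
    [("states", (PySem.List.pyRange 0 (sx.length : Int) 1).map
        (fun i => (PySem.List.pyGetD sx i 0, PySem.List.pyGetD sy i 0))),
     ("actions", (PySem.List.pyRange 0 (ax.length : Int) 1).map
        (fun i => (PySem.List.pyGetD ax i 0, PySem.List.pyGetD ay i 0)))]

-- ===== PORT B =====
def create_v_sequence_dict_alt (skill_len : Int) : List (String × List (Int × Int)) :=
  let half := skill_len.tdiv 2  -- int(skill_len/2), exact on the domain
  let actions := (PySem.List.pyRange 0 skill_len 1).map
    (fun i => if i < half then ((1 : Int), (-2 : Int)) else (1, 2))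
  let states := ((0 : Int), (0 : Int)) :: (PySem.List.pyRange 1 (skill_len + 1) 1).map
    (fun i => (i, if i ≤ half then -2 * i else 2 * i - 4 * half))
  [("states", states), ("actions", actions)]

-- ===== PRECONDITION & SPEC =====
def Spec_create_v_sequence_dict (skill_len : Int) (out : List (String × List (Int × Int))) : Prop := out = create_v_sequence_dict_alt skill_len
instance (skill_len : Int) (out : List (String × List (Int × Int))) : Decidable (Spec_create_v_sequence_dict skill_len out) := by unfold Spec_create_v_sequence_dict; infer_instance

-- ===== CLAIM (what is proved, stated in full; the proofs are below) =====
def Claim_equal_create_v_sequence_dict : Prop := ∀ (skill_len : Int), Dom_create_v_sequence_dict skill_len → Spec_create_v_sequence_dict skill_len (create_v_sequence_dict skill_len)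

-- ===== LEMMAS AND PROOFS =====

-- shifting a closed-form map over range by one step
lemma pv_map_range_shift (x c : Int) (n : Nat) :
    (List.range (n + 1)).map (fun (k : Nat) => x + c * (k : Int)) =
      x :: (List.range n).map (fun (k : Nat) => (x + c) + c * (k : Int)) := by
  rw [List.range_succ_eq_map, List.map_cons, List.map_map]
  congr 1
  · simp
  · apply List.map_congr_left
    intro k _
    simp [Nat.succ_eq_add_one, Function.comp]
    ring

lemma pv_map_range_shift1 (x : Int) (n : Nat) :
    (List.range (n + 1)).map (fun (k : Nat) => x + (k : Int)) =
      x :: (List.range n).map (fun (k : Nat) => (x + 1) + (k : Int)) := by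
  rw [List.range_succ_eq_map, List.map_cons, List.map_map]
  congr 1
  · simp
  · apply List.map_congr_left
    intro k _
    simp [Nat.succ_eq_add_one, Function.comp]
    ring

-- closed form of A's loop: the fold only grows the four lists in lockstep
lemma pv_foldA (l : List Int) (dy : Int) :
    ∀ (sx sy ax ay : List Int) (x y : Int),
    l.foldl (pvStepA dy) (sx ++ [x], sy ++ [y], ax, ay) =
      (sx ++ (List.range (l.length + 1)).map (fun (k : Nat) => x + (k : Int)),
       sy ++ (List.range (l.length + 1)).map (fun (k : Nat) => y + dy * (k : Int)),
       ax ++ List.replicate l.length 1,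
       ay ++ List.replicate l.length dy) := by
  induction l with
  | nil => intro sx sy ax ay x y; simp [List.range_succ]
  | cons a l ih =>
    intro sx sy ax ay x y
    rw [List.foldl_cons]
    have hstep : pvStepA dy (sx ++ [x], sy ++ [y], ax, ay) a =
        ((sx ++ [x]) ++ [x + 1], (sy ++ [y]) ++ [y + dy], ax ++ [1], ay ++ [dy]) := by
      simp [pvStepA, PySem.List.pyGetD_neg_one_append_singleton]
    rw [hstep, ih]
    refine Prod.ext ?_ (Prod.ext ?_ (Prod.ext ?_ ?_)) <;> simp
    · rw [pv_map_range_shift1 x (l.length + 1)]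
    · rw [pv_map_range_shift y dy (l.length + 1)]
    · simp [List.replicate_succ]
    · simp [List.replicate_succ]

-- A's final comprehension over two equal-length lists is zip
lemma pv_pair_comp (xs ys : List Int) (h : ys.length = xs.length) :
    (PySem.List.pyRange 0 (xs.length : Int) 1).map
        (fun i => (PySem.List.pyGetD xs i 0, PySem.List.pyGetD ys i 0)) = xs.zip ys := by
  rw [PySem.List.pyRange_zero_nat, List.map_map]
  apply List.ext_getElem
  · simp [h]
  · intro j h1 h2
    simp only [List.getElem_map, List.getElem_range, Function.comp,
      PySem.List.pyGetD_natCast, List.getElem_zip]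
    have hj : j < xs.length := by simpa using h1
    rw [List.getD_eq_getElem _ _ hj, List.getD_eq_getElem _ _ (by omega)]

-- sign facts about int(skill_len/2) = Int.tdiv skill_len 2
lemma pv_tdiv_facts (s : Int) : (0 ≤ s → 0 ≤ s.tdiv 2 ∧ s.tdiv 2 ≤ s) ∧ (s < 0 → s.tdiv 2 ≤ 0 ∧ s ≤ s.tdiv 2) := by
  constructor
  · intro hs
    rw [Int.tdiv_eq_ediv_of_nonneg hs]
    omega
  · intro hs
    have h1 : (-s).tdiv 2 = (-s) / 2 := Int.tdiv_eq_ediv_of_nonneg (by omega)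
    have h2 : (-s).tdiv 2 = -(s.tdiv 2) := Int.neg_tdiv s 2
    omega

-- for skill_len < 0 both loops and both comprehension ranges are empty
lemma pv_main_neg (s : Int) (hs : s < 0) :
    create_v_sequence_dict s = create_v_sequence_dict_alt s := by
  have hf := (pv_tdiv_facts s).2 hs
  simp only [create_v_sequence_dict, create_v_sequence_dict_alt,
    PySem.List.pyRange_one_eq_nil (show s.tdiv 2 ≤ 0 by omega),
    PySem.List.pyRange_one_eq_nil (show s ≤ s.tdiv 2 by omega),
    PySem.List.pyRange_one_eq_nil (show s ≤ 0 by omega),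
    PySem.List.pyRange_one_eq_nil (show s + 1 ≤ 1 by omega),
    List.foldl_nil, List.map_nil]
  norm_num [PySem.List.pyRange_one]

-- positive case: both sides reduce to the same explicit lists
lemma pv_main_pos (s : Int) (hs : 0 ≤ s) :
    create_v_sequence_dict s = create_v_sequence_dict_alt s := by
  have hf := (pv_tdiv_facts s).1 hs
  set h := s.tdiv 2 with hdef
  set n1 := h.toNat with hn1
  set n2 := (s - h).toNat with hn2
  simp only [create_v_sequence_dict, create_v_sequence_dict_alt]
  have e1 := pv_foldA (PySem.List.pyRange 0 h 1) (-2) [] [] [] [] 0 0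
  rw [PySem.List.length_pyRange_one] at e1
  simp only [List.nil_append, sub_zero] at e1
  have hsplit : ∀ (f : Nat → Int) (n : Nat), (List.range (n+1)).map f = (List.range n).map f ++ [f n] := by
    intro f n; rw [List.range_succ, List.map_append, List.map_singleton]
  rw [hsplit, hsplit] at e1
  rw [e1]
  have e2 := pv_foldA (PySem.List.pyRange h s 1) 2
      ((List.range n1).map (fun (k:Nat) => (0:Int) + (k:Int)))
      ((List.range n1).map (fun (k:Nat) => (0:Int) + (-2) * (k:Int)))
      (List.replicate n1 1) (List.replicate n1 (-2))
      ((0:Int) + (n1:Int)) ((0:Int) + (-2) * (n1:Int))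
  rw [PySem.List.length_pyRange_one] at e2
  have hn2' : (s - h).toNat = n2 := rfl
  rw [hn2'] at e2
  rw [e2]
  have hA : (n1 : Int) = s.tdiv 2 := by rw [hn1, ← hdef]; exact Int.toNat_of_nonneg hf.1
  have hB : (n2 : Int) = s - s.tdiv 2 := by rw [hn2, ← hdef]; exact Int.toNat_of_nonneg (by omega)
  have hlen1 : (List.map (fun (k:Nat) => (0:Int) + ↑k) (List.range n1) ++
      List.map (fun (k:Nat) => (0:Int) + ↑n1 + ↑k) (List.range (n2 + 1))).length = n1 + (n2 + 1) := by
    simp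
  have hlen2 : (List.map (fun (k:Nat) => (0:Int) + -2 * ↑k) (List.range n1) ++
      List.map (fun (k:Nat) => (0:Int) + -2 * ↑n1 + 2 * ↑k) (List.range (n2 + 1))).length = n1 + (n2 + 1) := by
    simp
  rw [pv_pair_comp _ _ (by rw [hlen1, hlen2]), pv_pair_comp _ _ (by simp)]
  rw [List.zip_append (by simp), List.zip_map', List.zip_map',
      List.zip_append (by simp), List.zip_replicate, List.zip_replicate]
  rw [PySem.List.pyRange_one 1 (s+1), PySem.List.pyRange_zero]
  have hts : (s + 1 - 1).toNat = n1 + n2 := by omega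
  have hts2 : s.toNat = n1 + n2 := by omega
  rw [hts, hts2]
  simp only [List.cons.injEq, Prod.mk.injEq, min_self]
  refine ⟨⟨trivial, ?_⟩, ⟨trivial, ?_⟩, trivial⟩
  · apply List.ext_getElem
    · simp; omega
    · intro j hj1 hj2
      simp only [List.getElem_append, List.getElem_map, List.getElem_range, List.getElem_cons,
        List.length_map, List.length_range]
      split_ifs <;> simp_all [Prod.ext_iff] <;> omega
  · apply List.ext_getElem
    · simp
    · intro j hj1 hj2
      simp only [List.getElem_append, List.getElem_map, List.getElem_range, List.getElem_replicate,
        List.length_replicate, List.range_add]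
      split_ifs <;> (simp_all [Prod.ext_iff]; try omega)

-- ===== VERDICT (by name: the statement is the Claim_ definition above) =====
theorem create_v_sequence_dict_spec : Claim_equal_create_v_sequence_dict := by
  intro skill_len _
  unfold Spec_create_v_sequence_dict
  by_cases hs : 0 ≤ skill_len
  · exact pv_main_pos skill_len hs
  · exact pv_main_neg skill_len (by omega)
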